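-- pv_equiv track=rewrite | github.com/khamdam-kadirov/ISTA-131 | lab1.py | score_name
-- ===== SOURCE A (Python) =====
-- def build_dict():
--     '''
--     Define a function, build_dict(), that returns a dictionary mapping the alphabet to numbers as follows: {'a':1, 'b':2, ..., 'z':26}. Use a loop.
--     '''
--     import string
--     alphabet = {}
--     num = 0
--     for i in string.ascii_lowercase:
--         alphabet[i] = num
--         num += 1
--     return alphabet
--
-- def score_name(alphabet_values, name):
--     '''
--     Define a function, score_name(), that takes the dictionary from build_dict() and a name and returns the sum of the characters' values.
--     For example, 'rich' -> 38
--     '''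
--     alphabet_values = build_dict()
--     summ = 0
--     for char in name:
--         if char.lower() in alphabet_values:
--             summ += alphabet_values[char.lower()]
--     return summ
--     pass
-- ===== SOURCE B (Python) =====
-- def score_name(alphabet_values, name):
--     # alphabet_values is ignored, exactly as in A (which rebuilds its own dict).
--     # Group-by-multiplicity: for each alphabet letter, add its value times the
--     # number of times it occurs in the lowercased name.
--     low = list(name.lower())
--     total = 0
--     for value, letter in enumerate('abcdefghijklmnopqrstuvwxyz'):
--         total += value * low.count(letter)
--     return total
-- ===== Notes on version B (the rewrite author's own statement) =====
-- stated objective: alternative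
-- what changed: Inverts the traversal: instead of one pass over the name with a per-character dict lookup, B iterates over the 26 alphabet letters and adds value*multiplicity using list.count over the lowercased name (group-by-count).
import Mathlib
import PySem

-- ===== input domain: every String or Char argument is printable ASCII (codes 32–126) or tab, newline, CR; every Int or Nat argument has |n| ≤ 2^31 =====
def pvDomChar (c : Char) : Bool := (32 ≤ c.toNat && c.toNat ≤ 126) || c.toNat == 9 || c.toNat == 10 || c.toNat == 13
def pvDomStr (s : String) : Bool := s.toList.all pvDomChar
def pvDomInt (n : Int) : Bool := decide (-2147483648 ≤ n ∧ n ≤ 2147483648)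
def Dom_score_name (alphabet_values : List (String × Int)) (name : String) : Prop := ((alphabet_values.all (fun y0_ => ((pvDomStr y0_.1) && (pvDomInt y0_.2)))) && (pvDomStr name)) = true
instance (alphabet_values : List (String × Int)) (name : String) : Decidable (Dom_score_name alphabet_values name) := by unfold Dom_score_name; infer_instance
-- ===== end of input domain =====

-- B inverts the traversal: it loops over the 26 alphabet letters and adds value * multiplicity
-- (list.count over the lowercased name), instead of A's per-character dict lookup pass.
-- Both implementations ignore the alphabet_values parameter, exactly as A does.

-- ===== PORT A =====
-- build_dict(): dict {'a':0, ..., 'z':25} built by a loop over string.ascii_lowercase (keys are 1-char strings, ported as Char)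
def build_dict : PySem.Dict Char Int :=
  (("abcdefghijklmnopqrstuvwxyz".toList).foldl
    (fun (st : PySem.Dict Char Int × Int) i => (st.1.insert i st.2, st.2 + 1))
    (PySem.Dict.empty, 0)).1

def score_name (alphabet_values : List (String × Int)) (name : String) : Int :=
  let av := build_dict   -- A overwrites its alphabet_values parameter with build_dict()
  name.toList.foldl
    (fun summ char =>
      if (av.contains (PySem.Chars.lowerChar char)) = true then
        summ + av.getD (PySem.Chars.lowerChar char) 0
      else summ) 0

-- ===== PORT B =====
def score_name_alt (alphabet_values : List (String × Int)) (name : String) : Int :=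
  let low := (PySem.Str.lower name).toList
  (PySem.List.enumerate "abcdefghijklmnopqrstuvwxyz".toList).foldl
    (fun total p => total + p.1 * (low.count p.2 : Int)) 0

-- ===== PRECONDITION & SPEC =====
def Spec_score_name (alphabet_values : List (String × Int)) (name : String) (out : Int) : Prop := out = score_name_alt alphabet_values name
instance (alphabet_values : List (String × Int)) (name : String) (out : Int) : Decidable (Spec_score_name alphabet_values name out) := by unfold Spec_score_name; infer_instance

-- ===== CLAIM (what is proved, stated in full; the proofs are below) =====
def Claim_equal_score_name : Prop := ∀ (alphabet_values : List (String × Int)) (name : String), Dom_score_name alphabet_values name → Spec_score_name alphabet_values name (score_name alphabet_values name)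

-- ===== LEMMAS AND PROOFS =====

-- the per-character contribution of A's loop body
def contribA (c : Char) : Int :=
  if (build_dict.contains (PySem.Chars.lowerChar c)) = true then
    build_dict.getD (PySem.Chars.lowerChar c) 0
  else 0

-- the contribution of one (lowered) character d to B's group-by-count sum
def contribB (d : Char) : Int :=
  ((PySem.List.enumerate "abcdefghijklmnopqrstuvwxyz".toList).map
    (fun p => p.1 * (if p.2 = d then (1:Int) else 0))).sum

-- on every character of the domain A's contribution equals B's (checked over all 127 ASCII codes)
lemma contrib_eq_of_dom (c : Char) (h : pvDomChar c = true) :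
    contribA c = contribB (PySem.Chars.lowerChar c) := by
  have hlt : c.toNat < 127 := by
    simp only [pvDomChar, Bool.or_eq_true, Bool.and_eq_true, decide_eq_true_eq, beq_iff_eq] at h
    omega
  have hall : ∀ n : Nat, n < 127 →
      contribA (Char.ofNat n) = contribB (PySem.Chars.lowerChar (Char.ofNat n)) := by
    set_option maxRecDepth 8192 in decide
  have := hall c.toNat hlt
  rwa [Char.ofNat_toNat] at this

-- A's loop accumulates exactly the sum of contribA
lemma foldA (cs : List Char) (s : Int) :
    cs.foldl
      (fun summ char =>
        if (build_dict.contains (PySem.Chars.lowerChar char)) = true then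
          summ + build_dict.getD (PySem.Chars.lowerChar char) 0
        else summ) s = s + (cs.map contribA).sum := by
  induction cs generalizing s with
  | nil => simp
  | cons c cs ih =>
    simp only [List.foldl_cons, List.map_cons, List.sum_cons, ih, contribA]
    split_ifs <;> ring

-- B's fold over the enumerated alphabet is the sum of value*count
lemma foldB (ls : List Char) (s : Int) :
    (PySem.List.enumerate "abcdefghijklmnopqrstuvwxyz".toList).foldl
      (fun total p => total + p.1 * (ls.count p.2 : Int)) s
    = s + ((PySem.List.enumerate "abcdefghijklmnopqrstuvwxyz".toList).map
        (fun p => p.1 * (ls.count p.2 : Int))).sum := by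
  generalize (PySem.List.enumerate "abcdefghijklmnopqrstuvwxyz".toList) = E
  induction E generalizing s with
  | nil => simp
  | cons p E ih => simp [List.foldl_cons, ih]; ring

-- exchanging the two summations: summing value*count over the alphabet
-- equals summing contribB over the characters of the (lowered) name
lemma swap_sums (ls : List Char) :
    ((PySem.List.enumerate "abcdefghijklmnopqrstuvwxyz".toList).map
      (fun p => p.1 * (ls.count p.2 : Int))).sum = (ls.map contribB).sum := by
  induction ls with
  | nil => simp
  | cons d ls ih =>
    simp only [List.map_cons, List.sum_cons, ← ih, contribB]
    generalize (PySem.List.enumerate "abcdefghijklmnopqrstuvwxyz".toList) = E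
    induction E with
    | nil => simp
    | cons p E ihE =>
      simp only [List.map_cons, List.sum_cons] at *
      have hc : ((d :: ls).count p.2 : Int) = (ls.count p.2 : Int) + (if p.2 = d then 1 else 0) := by
        rcases eq_or_ne p.2 d with h | h
        · simp [h, List.count_cons_self]
        · simp [h, Ne.symm h]
      rw [hc]
      linarith [ihE]

-- ===== VERDICT (by name: the statement is the Claim_ definition above) =====
theorem score_name_spec : Claim_equal_score_name := by
  intro alphabet_values name hdom
  unfold Spec_score_name score_name score_name_alt
  have hname : pvDomStr name = true := by
    simp only [Dom_score_name, Bool.and_eq_true] at hdom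
    exact hdom.2
  rw [foldA, foldB, swap_sums, PySem.Str.toList_lower, PySem.Chars.lower, List.map_map]
  simp only [zero_add]
  apply congrArg
  apply List.map_congr_left
  intro c hc
  have : pvDomChar c = true := by
    simp only [pvDomStr, List.all_eq_true] at hname
    exact hname c hc
  simpa [Function.comp] using contrib_eq_of_dom c this
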